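-- pv_equiv track=rewrite | github.com/LuchianovAntoniu-Aureliu/GrundlagenderProgrammierungRepository | Labor2/main.py | numere_simetrice
-- ===== SOURCE A (Python) =====
-- def numere_simetrice(lista):
--     numar_perechi = 0
--
--     for i in range(len(lista)):
--         for j in range(i + 1, len(lista)):
--             numar1 = lista[i]
--             numar2 = lista[j]
--
--             if numar1 // 10 == numar2 % 10 and numar1 % 10 == numar2 // 10:
--                 numar_perechi += 1
--
--     return numar_perechi
-- ===== SOURCE B (Python) =====
-- def numere_simetrice(lista):
--     numar_perechi = 0
--     vazute = {}
--     for numar in lista: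
--         numar_perechi += vazute.get((numar % 10, numar // 10), 0)
--         cheie = (numar // 10, numar % 10)
--         vazute[cheie] = vazute.get(cheie, 0) + 1
--     return numar_perechi
-- ===== Notes on version B (the rewrite author's own statement) =====
-- stated objective: faster
-- what changed: Replaced the O(n^2) nested index loops comparing every pair by a single pass that keeps a dict counting occurrences of each (tens,units) digit key and, for each element, adds the count of earlier elements carrying the mirrored key.
import Mathlib
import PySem

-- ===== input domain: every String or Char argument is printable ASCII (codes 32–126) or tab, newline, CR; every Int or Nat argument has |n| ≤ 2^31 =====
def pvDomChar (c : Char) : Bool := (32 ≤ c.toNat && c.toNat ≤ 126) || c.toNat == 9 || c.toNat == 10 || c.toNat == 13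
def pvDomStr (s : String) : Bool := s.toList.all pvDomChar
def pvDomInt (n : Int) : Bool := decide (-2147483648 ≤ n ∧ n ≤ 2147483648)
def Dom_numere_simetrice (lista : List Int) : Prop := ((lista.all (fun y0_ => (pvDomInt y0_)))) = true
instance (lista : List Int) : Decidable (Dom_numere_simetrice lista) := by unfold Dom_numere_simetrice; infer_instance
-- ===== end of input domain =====

-- B replaces A's O(n^2) nested index loops by one pass with a dict counting
-- (tens, units) digit keys; objective: faster (asymptotic).


-- ===== PORT A =====
def numere_simetrice (lista : List Int) : Int :=
  (PySem.List.pyRange 0 (lista.length : Int) 1).foldl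
    (fun numar_perechi i =>
      (PySem.List.pyRange (i + 1) (lista.length : Int) 1).foldl
        (fun numar_perechi j =>
          let numar1 := PySem.List.pyGetD lista i 0
          let numar2 := PySem.List.pyGetD lista j 0
          if PySem.Int.floordiv numar1 10 = PySem.Int.mod numar2 10 ∧
             PySem.Int.mod numar1 10 = PySem.Int.floordiv numar2 10
          then numar_perechi + 1 else numar_perechi)
        numar_perechi)
    0

-- ===== PORT B =====
-- one step of B's loop: add the count of earlier elements whose key mirrors
-- this element's digits, then bump this element's own key
def bStep (st : PySem.Dict (Int × Int) Int × Int) (numar : Int) :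
    PySem.Dict (Int × Int) Int × Int :=
  let numar_perechi := st.2 + st.1.getD (PySem.Int.mod numar 10, PySem.Int.floordiv numar 10) 0
  let cheie := (PySem.Int.floordiv numar 10, PySem.Int.mod numar 10)
  (st.1.insert cheie (st.1.getD cheie 0 + 1), numar_perechi)

def numere_simetrice_alt (lista : List Int) : Int :=
  (lista.foldl bStep (PySem.Dict.empty, 0)).2

-- ===== PRECONDITION & SPEC =====
def Spec_numere_simetrice (lista : List Int) (out : Int) : Prop := out = numere_simetrice_alt lista
instance (lista : List Int) (out : Int) : Decidable (Spec_numere_simetrice lista out) := by unfold Spec_numere_simetrice; infer_instance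

-- ===== CLAIM (what is proved, stated in full; the proofs are below) =====
def Claim_equal_numere_simetrice : Prop := ∀ (lista : List Int), Dom_numere_simetrice lista → Spec_numere_simetrice lista (numere_simetrice lista)

-- ===== LEMMAS AND PROOFS =====

-- the pair condition of A, as a Bool
def pcond (a b : Int) : Bool :=
  decide (PySem.Int.floordiv a 10 = PySem.Int.mod b 10) &&
  decide (PySem.Int.mod a 10 = PySem.Int.floordiv b 10)

-- the digit key B stores for an element
def keyOf (a : Int) : Int × Int := (PySem.Int.floordiv a 10, PySem.Int.mod a 10)
-- the mirrored key B looks up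
def revOf (b : Int) : Int × Int := (PySem.Int.mod b 10, PySem.Int.floordiv b 10)

theorem pcond_eq (a b : Int) : pcond a b = decide (keyOf a = revOf b) := by
  simp [pcond, keyOf, revOf, Prod.ext_iff]

-- pair count grouped by the FIRST element of each pair (A's grouping)
def pairsA : List Int → Int
  | [] => 0
  | x :: xs => (xs.countP (pcond x) : Int) + pairsA xs

-- pair count grouped by the SECOND element, with a prefix already seen (B's grouping)
def pairsFrom (pre : List Int) : List Int → Int
  | [] => 0
  | x :: xs => (pre.countP (fun a => pcond a x) : Int) + pairsFrom (pre ++ [x]) xs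

-- pairs between every element of pre and every element of l
def cross (pre l : List Int) : Int :=
  (l.map (fun b => (pre.countP (fun a => pcond a b) : Int))).sum

theorem A_eq_sum (l : List Int) :
    numere_simetrice l =
      ((List.range l.length).map
        (fun k => ((l.drop (k + 1)).countP (pcond (l.getD k 0)) : Int))).sum := by
  unfold numere_simetrice
  rw [PySem.List.foldl_congr_mem _ _
      (fun numar_perechi i => numar_perechi +
        (((l.drop (i + 1).toNat).countP (pcond (PySem.List.pyGetD l i 0)) : Nat) : Int)) 0 ?_]
  · rw [PySem.List.foldl_add]
    rw [PySem.List.pyRange_zero_nat l.length, List.map_map, zero_add]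
    apply congrArg
    apply List.map_congr_left
    intro k _
    have h1 : ((k : Int) + 1).toNat = k + 1 := by omega
    simp only [Function.comp_apply]
    rw [h1, PySem.List.pyGetD_natCast]
  · intro acc i hi
    have h0 : (0 : Int) ≤ i + 1 := by
      have := (PySem.List.mem_pyRange_one).mp hi
      omega
    have := PySem.List.foldl_pyRange_pyGetD' l 0
      (fun acc2 v => if pcond (PySem.List.pyGetD l i 0) v then acc2 + 1 else acc2) acc h0
    simp only []
    rw [show (fun (numar_perechi : Int) j =>
          let numar1 := PySem.List.pyGetD l i 0
          let numar2 := PySem.List.pyGetD l j 0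
          if PySem.Int.floordiv numar1 10 = PySem.Int.mod numar2 10 ∧
             PySem.Int.mod numar1 10 = PySem.Int.floordiv numar2 10
          then numar_perechi + 1 else numar_perechi) =
        (fun (acc2 : Int) j =>
          if pcond (PySem.List.pyGetD l i 0) (PySem.List.pyGetD l j 0) then acc2 + 1 else acc2)
      from by
        funext acc2 j
        simp [pcond, Bool.and_eq_true, decide_eq_true_eq]]
    rw [this, PySem.List.foldl_count_if]

theorem sum_eq_pairsA (l : List Int) :
    ((List.range l.length).map
      (fun k => ((l.drop (k + 1)).countP (pcond (l.getD k 0)) : Int))).sum = pairsA l := by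
  induction l with
  | nil => simp [pairsA]
  | cons x xs ih =>
    rw [List.length_cons, List.range_succ_eq_map, pairsA, ← ih]
    simp only [List.map_cons, List.map_map, List.sum_cons]
    congr 1

theorem B_inv (l : List Int) :
    ∀ (pre : List Int) (d : PySem.Dict (Int × Int) Int) (c : Int),
      (∀ k, d.getD k 0 = ((pre.countP (fun a => decide (keyOf a = k))) : Int)) →
      (l.foldl bStep (d, c)).2 = c + pairsFrom pre l := by
  induction l with
  | nil => intro pre d c _; simp [pairsFrom]
  | cons x xs ih =>
    intro pre d c hd
    rw [List.foldl_cons]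
    have hstep : bStep (d, c) x =
        (d.insert (keyOf x) (d.getD (keyOf x) 0 + 1), c + d.getD (revOf x) 0) := by
      simp [bStep, keyOf, revOf]
    rw [hstep]
    rw [ih (pre ++ [x]) _ _ ?_]
    · rw [pairsFrom]
      have hc : d.getD (revOf x) 0 = ((pre.countP (fun a => pcond a x)) : Int) := by
        rw [hd (revOf x)]
        congr 1
        apply List.countP_congr
        intro a _
        rw [pcond_eq]
      rw [hc]; ring
    · intro k
      rw [PySem.Dict.getD_insert, List.countP_append]
      by_cases hk : k = keyOf x
      · subst hk
        simp [hd (keyOf x)]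
      · rw [if_neg hk, hd k]
        have : ([x].countP (fun a => decide (keyOf a = k))) = 0 := by
          simp [List.countP_cons]
          exact fun h => (hk h.symm).elim
        rw [this]
        simp

theorem cross_append (pre l : List Int) (x : Int) :
    cross (pre ++ [x]) l = cross pre l + cross [x] l := by
  unfold cross
  rw [← PySem.List.sum_map_add_int]
  apply congrArg
  apply List.map_congr_left
  intro b _
  rw [List.countP_append]
  push_cast
  ring

theorem pairsFrom_split (l : List Int) :
    ∀ pre, pairsFrom pre l = cross pre l + pairsFrom [] l := by
  induction l with
  | nil => intro pre; simp [pairsFrom, cross]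
  | cons x xs ih =>
    intro pre
    rw [pairsFrom, ih (pre ++ [x]), cross_append]
    rw [show pairsFrom [] (x :: xs) = pairsFrom [x] xs from by simp [pairsFrom]]
    rw [ih [x]]
    rw [show cross pre (x :: xs) =
        ((pre.countP (fun a => pcond a x)) : Int) + cross pre xs from by
      simp [cross]]
    ring

theorem pairsFrom_nil_eq_pairsA (l : List Int) : pairsFrom [] l = pairsA l := by
  induction l with
  | nil => rfl
  | cons x xs ih =>
    rw [show pairsFrom [] (x :: xs) = pairsFrom [x] xs from by simp [pairsFrom]]
    rw [pairsFrom_split, ih, pairsA]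
    congr 1
    unfold cross
    rw [← PySem.List.sum_map_ite_one_zero (pcond x) xs]
    apply congrArg
    apply List.map_congr_left
    intro b _
    simp [List.countP_cons]

theorem B_eq (l : List Int) : numere_simetrice_alt l = pairsA l := by
  unfold numere_simetrice_alt
  rw [B_inv l [] PySem.Dict.empty 0 (fun k => by simp [PySem.Dict.getD_empty])]
  rw [pairsFrom_nil_eq_pairsA]
  ring

-- ===== VERDICT (by name: the statement is the Claim_ definition above) =====
theorem numere_simetrice_spec : Claim_equal_numere_simetrice := by
  intro lista _
  unfold Spec_numere_simetrice
  rw [A_eq_sum, sum_eq_pairsA, B_eq]
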